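-- pv_equiv track=rewrite | github.com/olovekb/urfu_LLM_Documents | parser/src/app/checker/utils/text_utils.py | clear_text_abc
-- ===== SOURCE A (Python) =====
-- def clear_text_abc(text):
--     l_text = text.split(" ")[::-1]
--
--     ind = 0
--     for word in l_text:
--         if len(word) > 1:
--             break
--         ind += 1
--
--     l_text = l_text[ind:]
--     return " ".join(l_text[::-1])
-- ===== SOURCE B (Python) =====
-- def clear_text_abc(text):
--     words = text.split(" ")
--     last = 0
--     for i, word in enumerate(words):
--         if len(word) > 1:
--             last = i + 1
--     return " ".join(words[:last])
-- ===== Notes on version B (the rewrite author's own statement) =====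
-- stated objective: alternative
-- what changed: B replaces A's double-reverse-and-count (reverse the word list, count the leading short words, drop them, reverse back) by a single forward pass that maintains the index just past the last word of length > 1 and slices the original list there.
import Mathlib
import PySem

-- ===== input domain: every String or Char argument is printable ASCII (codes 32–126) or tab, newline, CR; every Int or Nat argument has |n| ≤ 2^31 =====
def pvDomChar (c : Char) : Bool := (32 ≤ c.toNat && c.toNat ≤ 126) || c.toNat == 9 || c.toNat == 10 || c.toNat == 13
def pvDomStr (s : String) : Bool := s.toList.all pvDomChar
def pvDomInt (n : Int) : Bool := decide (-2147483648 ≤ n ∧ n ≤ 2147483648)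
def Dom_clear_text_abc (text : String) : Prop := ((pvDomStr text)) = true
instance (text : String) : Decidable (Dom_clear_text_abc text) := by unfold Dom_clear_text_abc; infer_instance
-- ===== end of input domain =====

-- B drops the two reversals of A: one forward pass keeps the index just past the last word
-- of length > 1 and the original list is sliced there (alternative decomposition; same cost).

-- ===== PORT A =====
-- the 'for word in l_text: if len(word) > 1: break; ind += 1' loop of A
def pvIndA : List String → Nat
  | [] => 0
  | w :: ws => if 1 < PySem.Str.len w then 0 else pvIndA ws + 1

def clear_text_abc (text : String) : String :=
  let l_text := ((PySem.Str.split? text " ").getD []).reverse  -- text.split(" ")[::-1]; split? is some for sep ≠ ""; [::-1] per slice?_none_none_neg_one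
  let ind := pvIndA l_text
  let l_text2 := l_text.drop ind                               -- l_text[ind:], 0 ≤ ind
  PySem.Str.join " " l_text2.reverse                           -- " ".join(l_text[::-1])

-- ===== PORT B =====
-- B's 'for i, word in enumerate(words): if len(word) > 1: last = i + 1' loop
def pvLastIdx (words : List String) : Int :=
  (PySem.List.enumerate words).foldl
    (fun last iw => if 1 < PySem.Str.len iw.2 then iw.1 + 1 else last) 0

def clear_text_abc_alt (text : String) : String :=
  let words := (PySem.Str.split? text " ").getD []             -- text.split(" ")
  let last := pvLastIdx words
  PySem.Str.join " " (PySem.List.slice words none (some last)) -- " ".join(words[:last])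

-- ===== PRECONDITION & SPEC =====
def Spec_clear_text_abc (text : String) (out : String) : Prop := out = clear_text_abc_alt text
instance (text : String) (out : String) : Decidable (Spec_clear_text_abc text out) := by unfold Spec_clear_text_abc; infer_instance

-- ===== CLAIM (what is proved, stated in full; the proofs are below) =====
def Claim_equal_clear_text_abc : Prop := ∀ (text : String), Dom_clear_text_abc text → Spec_clear_text_abc text (clear_text_abc text)

-- ===== LEMMAS AND PROOFS =====

-- A's counting loop counts exactly the leading words of length ≤ 1: dropping them is dropWhile
theorem pvIndA_drop (rs : List String) :
    rs.drop (pvIndA rs) = rs.dropWhile (fun w => !decide (1 < PySem.Str.len w)) := by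
  induction rs with
  | nil => rfl
  | cons w ws ih =>
    by_cases h : 1 < w.length
    · simp [pvIndA, h]
    · simp [pvIndA, h, ih]

-- B's fold computes the length of the suffix of ws.reverse left after stripping short words
theorem pvLastIdx_eq (ws : List String) :
    pvLastIdx ws =
      ((ws.reverse.dropWhile (fun w => !decide (1 < PySem.Str.len w))).length : Int) := by
  induction ws using List.reverseRecOn with
  | nil => rfl
  | append_singleton ws x ih =>
    simp only [pvLastIdx] at ih
    by_cases h : 1 < x.length
    · simp [pvLastIdx, PySem.List.enumerate_append, PySem.List.enumerate_cons,
        PySem.List.enumerate_nil, h]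
    · simp [pvLastIdx, PySem.List.enumerate_append, PySem.List.enumerate_cons,
        PySem.List.enumerate_nil, h]
      simpa using ih

theorem pv_key (ws : List String) :
    (ws.reverse.drop (pvIndA ws.reverse)).reverse =
      PySem.List.slice ws none (some (pvLastIdx ws)) := by
  rw [pvIndA_drop, pvLastIdx_eq, PySem.List.slice_to_natCast]
  have hsuf : ws.reverse.dropWhile (fun w => !decide (1 < PySem.Str.len w)) <:+ ws.reverse :=
    List.dropWhile_suffix _
  have hpre : (ws.reverse.dropWhile (fun w => !decide (1 < PySem.Str.len w))).reverse <+: ws := by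
    have := List.reverse_prefix.mpr hsuf
    simpa using this
  calc (ws.reverse.dropWhile (fun w => !decide (1 < PySem.Str.len w))).reverse
      = ws.take (ws.reverse.dropWhile (fun w => !decide (1 < PySem.Str.len w))).reverse.length := by
        exact List.prefix_iff_eq_take.mp hpre
    _ = ws.take (ws.reverse.dropWhile (fun w => !decide (1 < PySem.Str.len w))).length := by
        simp

-- ===== VERDICT (by name: the statement is the Claim_ definition above) =====
theorem clear_text_abc_spec : Claim_equal_clear_text_abc := by
  intro text _
  unfold Spec_clear_text_abc clear_text_abc clear_text_abc_alt
  simp only []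
  rw [pv_key]
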